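-- pv_equiv track=rewrite | github.com/eborche2/aoc2017 | day9.py | remove_exc
-- ===== SOURCE A (Python) =====
-- def remove_exc(content):
--     to_remove = []
--     skip = False
--     for x, each in enumerate(content):
--         if each == '!':
--             if skip:
--                 skip = False
--             else:
--                 to_remove.append(x)
--                 to_remove.append(x+1)
--                 skip = True
--         else:
--             if skip:
--                 skip = False
--     to_remove.sort(reverse=True)
--     for each in to_remove:
--         content = content[:each] + content[each+1:  ]
--     return content
-- ===== SOURCE B (Python) =====
-- import re
--
-- def remove_exc(content):
--     return re.sub(r'!.?', '', content, flags=re.DOTALL)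
-- ===== Notes on version B (the rewrite author's own statement) =====
-- stated objective: simpler
-- what changed: A scans to collect indices of each unescaped exclamation mark and its follower, reverse-sorts them and deletes them one slice-concatenation at a time; B removes every such pair in a single regex substitution (pattern bang-dot-optional with DOTALL).
import Mathlib
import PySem

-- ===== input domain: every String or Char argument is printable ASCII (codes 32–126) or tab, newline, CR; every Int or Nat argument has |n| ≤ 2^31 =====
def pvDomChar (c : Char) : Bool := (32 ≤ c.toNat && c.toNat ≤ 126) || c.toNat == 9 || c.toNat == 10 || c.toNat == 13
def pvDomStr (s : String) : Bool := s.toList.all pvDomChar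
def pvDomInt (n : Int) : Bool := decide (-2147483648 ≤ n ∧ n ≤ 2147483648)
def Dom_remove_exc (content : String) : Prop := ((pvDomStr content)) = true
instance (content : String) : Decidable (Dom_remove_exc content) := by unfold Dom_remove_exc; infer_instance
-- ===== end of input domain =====

-- B replaces A's index-collection loop plus reverse-sorted per-index deletion passes by a
-- single pattern-driven removal (one regex substitution in Python, one scan in the port): simpler.

-- ===== PORT A =====
-- the body of A's first 'for' loop (state = (to_remove, skip))
def stepA (st : List Int × Bool) (p : Int × Char) : List Int × Bool :=
  if p.2 = '!' then
    if st.2 then (st.1, false)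
    else (st.1 ++ [p.1] ++ [p.1 + 1], true)
  else
    if st.2 then (st.1, false) else st

-- content = content[:each] + content[each+1:]
def delA (cs : List Char) (e : Int) : List Char :=
  PySem.List.slice cs none (some e) ++ PySem.List.slice cs (some (e + 1)) none

def remove_exc (content : String) : String :=
  let st := (PySem.List.enumerate content.toList 0).foldl stepA ([], false)
  let to_remove := PySem.List.sorted st.1 (fun x => x) true
  String.ofList (to_remove.foldl delA content.toList)

-- ===== PORT B =====
-- Hand port of Source B's re.sub(r'!.?', '', content, flags=re.DOTALL): left-to-right
-- non-overlapping matching; exact for this pattern ('!' plus at most one following char).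
def subBangPair : List Char → List Char
  | [] => []
  | c :: rest =>
    if c = '!' then
      match rest with
      | [] => []
      | _ :: rest' => subBangPair rest'
    else c :: subBangPair rest

def remove_exc_alt (content : String) : String :=
  String.ofList (subBangPair content.toList)

-- ===== PRECONDITION & SPEC =====
def Spec_remove_exc (content : String) (out : String) : Prop := out = remove_exc_alt content
instance (content : String) (out : String) : Decidable (Spec_remove_exc content out) := by unfold Spec_remove_exc; infer_instance

-- ===== CLAIM (what is proved, stated in full; the proofs are below) =====
def Claim_equal_remove_exc : Prop := ∀ (content : String), Dom_remove_exc content → Spec_remove_exc content (remove_exc content)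

-- ===== LEMMAS AND PROOFS =====

-- the indices A's first loop collects, starting at position i
def ids : List Char → Int → List Int
  | [], _ => []
  | c :: rest, i =>
    if c = '!' then
      match rest with
      | [] => [i, i + 1]
      | _ :: rest' => i :: (i + 1) :: ids rest' (i + 2)
    else ids rest (i + 1)

theorem ids_nil (i : Int) : ids [] i = [] := rfl
theorem ids_bang_nil (i : Int) : ids ['!'] i = [i, i + 1] := rfl
theorem ids_bang_cons (d : Char) (rest : List Char) (i : Int) :
    ids ('!' :: d :: rest) i = i :: (i + 1) :: ids rest (i + 2) := rfl
theorem ids_ne (c : Char) (rest : List Char) (i : Int) (h : c ≠ '!') :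
    ids (c :: rest) i = ids rest (i + 1) := by
  rw [ids.eq_def]; simp [h]

theorem subBangPair_bang_cons (d : Char) (rest : List Char) :
    subBangPair ('!' :: d :: rest) = subBangPair rest := rfl
theorem subBangPair_ne (c : Char) (rest : List Char) (h : c ≠ '!') :
    subBangPair (c :: rest) = c :: subBangPair rest := by
  rw [subBangPair.eq_def]; simp [h]

theorem ids_ge : ∀ (l : List Char) (i e : Int), e ∈ ids l i → i ≤ e
  | [], _, _, h => by simp [ids_nil] at h
  | c :: rest, i, e, h => by
    by_cases hc : c = '!'
    · subst hc
      cases rest with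
      | nil =>
        rw [ids_bang_nil] at h
        simp only [List.mem_cons, List.not_mem_nil, or_false] at h
        rcases h with rfl | rfl <;> omega
      | cons d rest' =>
        rw [ids_bang_cons] at h
        simp only [List.mem_cons] at h
        rcases h with rfl | rfl | h
        · omega
        · omega
        · have := ids_ge rest' (i + 2) e h; omega
    · rw [ids_ne c rest i hc] at h
      have := ids_ge rest (i + 1) e h; omega

theorem ids_pairwise : ∀ (l : List Char) (i : Int), (ids l i).Pairwise (· < ·)
  | [], _ => by simp [ids_nil]
  | c :: rest, i => by
    by_cases hc : c = '!'
    · subst hc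
      cases rest with
      | nil => rw [ids_bang_nil]; simp
      | cons d rest' =>
        rw [ids_bang_cons]
        refine List.Pairwise.cons ?_ (List.Pairwise.cons ?_ (ids_pairwise rest' (i + 2)))
        · intro e he
          simp only [List.mem_cons] at he
          rcases he with rfl | he
          · omega
          · have := ids_ge rest' (i + 2) e he; omega
        · intro e he; have := ids_ge rest' (i + 2) e he; omega
    · rw [ids_ne c rest i hc]
      exact ids_pairwise rest (i + 1)

-- A's first loop collects exactly 'ids'
theorem foldA : ∀ (l : List Char) (i : Int) (acc : List Int),
    ∃ sk, (PySem.List.enumerate l i).foldl stepA (acc, false) = (acc ++ ids l i, sk)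
  | [], i, acc => ⟨false, by simp [PySem.List.enumerate_nil, ids_nil]⟩
  | c :: rest, i, acc => by
    by_cases hc : c = '!'
    · subst hc
      cases rest with
      | nil =>
        refine ⟨true, ?_⟩
        rw [PySem.List.enumerate_cons, PySem.List.enumerate_nil, ids_bang_nil]
        simp [stepA, List.append_assoc]
      | cons d rest' =>
        obtain ⟨sk, h⟩ := foldA rest' (i + 2) (acc ++ [i] ++ [i + 1])
        refine ⟨sk, ?_⟩
        rw [PySem.List.enumerate_cons, PySem.List.enumerate_cons, List.foldl_cons,
          List.foldl_cons]
        have e1 : stepA (acc, false) (i, '!') = (acc ++ [i] ++ [i + 1], true) := by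
          simp [stepA]
        have e2 : stepA (acc ++ [i] ++ [i + 1], true) (i + 1, d) =
            (acc ++ [i] ++ [i + 1], false) := by
          by_cases hd : d = '!' <;> simp [stepA, hd]
        rw [e1, e2, show i + 1 + 1 = i + 2 by ring, h, ids_bang_cons]
        simp [List.append_assoc]
    · obtain ⟨sk, h⟩ := foldA rest (i + 1) acc
      refine ⟨sk, ?_⟩
      rw [PySem.List.enumerate_cons, List.foldl_cons]
      have e1 : stepA (acc, false) (i, c) = (acc, false) := by simp [stepA, hc]
      rw [e1, h, ids_ne c rest i hc]

theorem ids_shift : ∀ (l : List Char) (i : Int), ids l (i + 1) = (ids l i).map (· + 1)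
  | [], _ => by simp [ids_nil]
  | c :: rest, i => by
    by_cases hc : c = '!'
    · subst hc
      cases rest with
      | nil => rw [ids_bang_nil, ids_bang_nil]; simp
      | cons d rest' =>
        rw [ids_bang_cons, ids_bang_cons, List.map_cons, List.map_cons,
          show i + 1 + 2 = i + 2 + 1 by ring, ids_shift rest' (i + 2)]
    · rw [ids_ne c rest (i + 1) hc, ids_ne c rest i hc, ids_shift rest (i + 1)]

-- deleting at a shifted index skips over the head
theorem delA_shift (c : Char) (cs : List Char) (e : Int) (he : 0 ≤ e) :
    delA (c :: cs) (e + 1) = c :: delA cs e := by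
  simp only [delA]
  rw [PySem.List.slice_to _ (by omega : (0:Int) ≤ e + 1), PySem.List.slice_to cs he,
    PySem.List.slice_from _ (by omega : (0:Int) ≤ e + 1 + 1),
    PySem.List.slice_from cs (by omega : (0:Int) ≤ e + 1)]
  rw [show (e + 1).toNat = e.toNat + 1 by omega,
    show (e + 1 + 1).toNat = (e + 1).toNat + 1 by omega,
    show (e + 1).toNat = e.toNat + 1 by omega]
  simp

theorem foldr_delA_shift (c : Char) (cs : List Char) :
    ∀ (es : List Int), (∀ e ∈ es, 0 ≤ e) →
    List.foldr (fun e t => delA t e) (c :: cs) (es.map (· + 1)) =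
      c :: List.foldr (fun e t => delA t e) cs es
  | [], _ => rfl
  | e :: es, h => by
    simp only [List.map_cons, List.foldr_cons]
    rw [foldr_delA_shift c cs es (fun x hx => h x (List.mem_cons_of_mem _ hx))]
    exact delA_shift c _ e (h e (List.mem_cons_self ..))

-- applying A's deletions, smallest index last, performs B's single-scan removal
theorem foldr_ids : ∀ (l : List Char),
    List.foldr (fun e t => delA t e) l (ids l 0) = subBangPair l
  | [] => rfl
  | c :: rest => by
    by_cases hc : c = '!'
    · subst hc
      cases rest with
      | nil => decide
      | cons d rest' =>
        rw [ids_bang_cons, subBangPair_bang_cons, List.foldr_cons, List.foldr_cons]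
        have h2 : ids rest' ((0:Int) + 2) = ((ids rest' 0).map (· + 1)).map (· + 1) := by
          rw [show ((0:Int) + 2) = 0 + 1 + 1 by ring, ids_shift, ids_shift]
        rw [h2]
        have hge1 : ∀ e ∈ (ids rest' 0).map (· + 1), (0:Int) ≤ e := by
          intro e he
          simp only [List.mem_map] at he
          obtain ⟨x, hx, rfl⟩ := he
          have := ids_ge rest' 0 x hx; omega
        rw [foldr_delA_shift '!' (d :: rest') ((ids rest' 0).map (· + 1)) hge1,
          foldr_delA_shift d rest' (ids rest' 0) (fun e he => ids_ge rest' 0 e he),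
          foldr_ids rest']
        have h1 : delA ('!' :: d :: subBangPair rest') (0 + 1) =
            '!' :: subBangPair rest' := by
          rw [delA, PySem.List.slice_to _ (by norm_num : (0:Int) ≤ 0 + 1),
            PySem.List.slice_from _ (by norm_num : (0:Int) ≤ 0 + 1 + 1)]
          simp
        rw [h1, delA, PySem.List.slice_to _ (le_refl (0:Int)),
          PySem.List.slice_from _ (by norm_num : (0:Int) ≤ 0 + 1)]
        simp
    · rw [ids_ne c rest 0 hc, subBangPair_ne c rest hc,
        show (0:Int) + 1 = 0 + 1 by ring, ids_shift rest 0,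
        foldr_delA_shift c rest (ids rest 0) (fun e he => ids_ge rest 0 e he),
        foldr_ids rest]

theorem sorted_rev_ids (l : List Char) :
    PySem.List.sorted (ids l 0) (fun x => x) true = (ids l 0).reverse :=
  PySem.List.sorted_rev_eq_of_perm_of_pairwise_gt _ _ _ (ids l 0).reverse_perm
    (by rw [List.pairwise_reverse]; exact (ids_pairwise l 0).imp (fun h => h))

-- ===== VERDICT (by name: the statement is the Claim_ definition above) =====
theorem remove_exc_spec : Claim_equal_remove_exc := by
  intro content _
  unfold Spec_remove_exc remove_exc remove_exc_alt
  obtain ⟨sk, h⟩ := foldA content.toList 0 []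
  simp only [h, List.nil_append]
  rw [sorted_rev_ids, List.foldl_reverse, foldr_ids content.toList]
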